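-- pv_equiv track=rewrite | github.com/jacksonjp0311-gif/CHEMIFRAME | chemiframe/planner/route_graph.py | build
-- ===== SOURCE A (Python) =====
-- from typing import Any, Dict
--
-- def build(route: Dict[str, Any]) -> Dict[str, Any]:
--     steps = route.get("steps", [])
--     nodes = []
--     edges = []
--     for idx, step in enumerate(steps):
--         node_id = f"n{idx}"
--         nodes.append({"id": node_id, "label": step.get("label", f"step_{idx}")})
--         if idx > 0:
--             edges.append({"source": f"n{idx-1}", "target": node_id})
--     return {"nodes": nodes, "edges": edges}
-- ===== SOURCE B (Python) =====
-- def build(route):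
--     def walk(i, steps):
--         # recursive descent: emit this step's node, and an edge from this node
--         # forward to its successor when one exists; recurse on the rest
--         if not steps:
--             return [], []
--         head, rest = steps[0], steps[1:]
--         node = {"id": f"n{i}", "label": head.get("label", f"step_{i}")}
--         nodes, edges = walk(i + 1, rest)
--         here = [{"source": f"n{i}", "target": f"n{i+1}"}] if rest else []
--         return [node] + nodes, here + edges
--     nodes, edges = walk(0, route.get("steps", []))
--     return {"nodes": nodes, "edges": edges}
-- ===== Notes on version B (the rewrite author's own statement) =====
-- stated objective: alternative
-- what changed: Replaced A's iterative enumerate loop with a backward-looking idx>0 edge guard by a recursive descent over the steps list that builds both lists front-to-back by prepending, emitting each edge forward from a node to its successor when one exists.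
import Mathlib
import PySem

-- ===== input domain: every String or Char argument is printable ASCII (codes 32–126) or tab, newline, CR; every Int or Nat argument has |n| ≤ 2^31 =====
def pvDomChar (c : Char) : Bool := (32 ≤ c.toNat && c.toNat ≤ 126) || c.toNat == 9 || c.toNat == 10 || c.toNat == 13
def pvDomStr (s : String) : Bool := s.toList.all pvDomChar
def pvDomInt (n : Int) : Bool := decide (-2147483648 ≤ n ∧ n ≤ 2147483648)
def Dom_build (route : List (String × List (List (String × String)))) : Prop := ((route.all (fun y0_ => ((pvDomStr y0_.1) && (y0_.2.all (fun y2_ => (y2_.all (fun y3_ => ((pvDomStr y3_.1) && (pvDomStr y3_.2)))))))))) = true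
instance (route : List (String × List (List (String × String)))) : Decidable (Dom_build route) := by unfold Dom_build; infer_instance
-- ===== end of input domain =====

-- B replaces A's iterative loop (backward edge guard idx>0) by a recursive descent that
-- emits each node plus a forward edge to its successor; return-value equivalence only.

-- ===== PORT A =====
-- one iteration of A's loop body: append a node, and an edge when idx > 0
def buildBody (acc : List (List (String × String)) × List (List (String × String)))
    (p : Int × List (String × String)) :
    List (List (String × String)) × List (List (String × String)) :=
  let nodeId := "n" ++ PySem.Int.toStr p.1
  let nodes := acc.1 ++ [[("id", nodeId), ("label", (p.2.lookup "label").getD ("step_" ++ PySem.Int.toStr p.1))]]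
  let edges := if p.1 > 0 then acc.2 ++ [[("source", "n" ++ PySem.Int.toStr (p.1 - 1)), ("target", nodeId)]] else acc.2
  (nodes, edges)

def build (route : List (String × List (List (String × String)))) : List (String × List (List (String × String))) :=
  let steps := (route.lookup "steps").getD []
  let acc := (PySem.List.enumerate steps).foldl buildBody ([], [])
  [("nodes", acc.1), ("edges", acc.2)]

-- ===== PORT B =====
-- recursive descent of Source B's walk: node for the head, forward edge when a successor exists
def walk (i : Int) : List (List (String × String)) →
    List (List (String × String)) × List (List (String × String))
  | [] => ([], [])
  | head :: rest =>
    let node := [("id", "n" ++ PySem.Int.toStr i), ("label", (head.lookup "label").getD ("step_" ++ PySem.Int.toStr i))]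
    let acc := walk (i + 1) rest
    let here := if rest.isEmpty then [] else [[("source", "n" ++ PySem.Int.toStr i), ("target", "n" ++ PySem.Int.toStr (i + 1))]]
    (node :: acc.1, here ++ acc.2)

def build_alt (route : List (String × List (List (String × String)))) : List (String × List (List (String × String))) :=
  let steps := (route.lookup "steps").getD []
  let acc := walk 0 steps
  [("nodes", acc.1), ("edges", acc.2)]

-- ===== PRECONDITION & SPEC =====
def Spec_build (route : List (String × List (List (String × String)))) (out : List (String × List (List (String × String)))) : Prop := out = build_alt route
instance (route : List (String × List (List (String × String)))) (out : List (String × List (List (String × String)))) : Decidable (Spec_build route out) := by unfold Spec_build; infer_instance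

-- ===== CLAIM =====
def Claim_equal_build : Prop := ∀ (route : List (String × List (List (String × String)))), Dom_build route → Spec_build route (build route)

-- ===== LEMMAS AND PROOFS =====

def nodeOf (p : Int × List (String × String)) : List (String × String) :=
  [("id", "n" ++ PySem.Int.toStr p.1), ("label", (p.2.lookup "label").getD ("step_" ++ PySem.Int.toStr p.1))]

def nodesFrom (s : Int) : List (List (String × String)) → List (List (String × String))
  | [] => []
  | x :: r => nodeOf (s, x) :: nodesFrom (s + 1) r

def mkEdge (i : Int) : List (String × String) :=
  [("source", "n" ++ PySem.Int.toStr (i - 1)), ("target", "n" ++ PySem.Int.toStr i)]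

-- edges emitted for steps enumerated from index s
def edgesFrom (s : Int) : List (List (String × String)) → List (List (String × String))
  | [] => []
  | _ :: r => mkEdge s :: edgesFrom (s + 1) r

theorem walk_eq (steps : List (List (String × String))) :
    ∀ s : Int, walk s steps = (nodesFrom s steps, edgesFrom (s + 1) steps.tail) := by
  induction steps with
  | nil => intro s; simp [walk, nodesFrom, edgesFrom]
  | cons x r ih =>
    intro s
    cases r with
    | nil => simp [walk, nodesFrom, edgesFrom, nodeOf]
    | cons y t =>
      rw [show walk s (x :: y :: t)
            = (nodeOf (s, x) :: (walk (s + 1) (y :: t)).1,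
               [[("source", "n" ++ PySem.Int.toStr s), ("target", "n" ++ PySem.Int.toStr (s + 1))]]
                 ++ (walk (s + 1) (y :: t)).2) from rfl,
          ih (s + 1)]
      simp [nodesFrom, edgesFrom, mkEdge, nodeOf]

theorem foldA (steps : List (List (String × String))) :
    ∀ (s : Int), 1 ≤ s → ∀ ns es,
      (PySem.List.enumerate steps s).foldl buildBody (ns, es)
        = (ns ++ nodesFrom s steps, es ++ edgesFrom s steps) := by
  induction steps with
  | nil => intro s _ ns es; simp [PySem.List.enumerate_nil, nodesFrom, edgesFrom]
  | cons x r ih =>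
    intro s hs ns es
    have hpos : s > 0 := by omega
    rw [PySem.List.enumerate_cons, List.foldl_cons]
    have hb : buildBody (ns, es) (s, x)
        = (ns ++ [nodeOf (s, x)], es ++ [mkEdge s]) := by
      simp [buildBody, nodeOf, mkEdge, hpos]
    rw [hb, ih (s + 1) (by omega)]
    simp [nodesFrom, edgesFrom]

-- ===== VERDICT =====
theorem build_spec : Claim_equal_build := by
  intro route _
  unfold Spec_build
  simp only [build, build_alt]
  cases hsteps : (route.lookup "steps").getD [] with
  | nil => simp [PySem.List.enumerate_nil, walk]
  | cons x r =>
    have hb0 : buildBody ([], []) (0, x) = ([nodeOf (0, x)], []) := by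
      simp [buildBody, nodeOf]
    rw [PySem.List.enumerate_cons, List.foldl_cons, hb0]
    simp only [zero_add]
    rw [foldA r 1 (by omega) [nodeOf (0, x)] [], walk_eq (x :: r) 0]
    simp [nodesFrom]
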